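-- pv_equiv track=rewrite | github.com/nokia/minifold | src/minifold/natural_join.py | are_naturally_joined
-- ===== SOURCE A (Python) =====
-- def are_naturally_joined(l: dict, r: dict) -> bool:
--     """
--     Internal function, used to check whether two dictionaries can be joined
--     using an NATURAL JOIN statement.
--
--     Args:
--         l (dict): The dictionary corresponding to the left operand.
--         r (dict): The dictionary corresponding to the right operand.
--
--     Returns:
--         ``True`` if and only if ``l`` and ``r`` can be joined,
--         ``False`` otherwise (i.e., ``l`` and ``r`` have no common key).
--     """
--     inter_keys = set(l.keys()) & set(r.keys())
--     if len(inter_keys) == 0: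
--         return False
--     for key in inter_keys:
--         if l[key] != r[key]:
--             return False
--     return True
-- ===== SOURCE B (Python) =====
-- def are_naturally_joined(l: dict, r: dict) -> bool:
--     # l and r are naturally joinable iff merging them in either order gives the
--     # same dict (merging overwrites common keys, so this says the values agree
--     # on every common key) and the merge actually collapsed at least one key
--     # (i.e. a common key exists).
--     merged = {**l, **r}
--     return len(merged) < len(l) + len(r) and merged == {**r, **l}
-- ===== Notes on version B (the rewrite author's own statement) =====
-- stated objective: alternative
-- what changed: B replaces A's build-the-key-intersection-and-scan-it algorithm by a dict-merge identity: l and r are joinable iff the merged dict {**l, **r} is strictly smaller than len(l)+len(r) (a key collapsed, so a common key exists) and merging in the two orders gives equal dicts (the overwritten common keys carried equal values).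
import Mathlib
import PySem

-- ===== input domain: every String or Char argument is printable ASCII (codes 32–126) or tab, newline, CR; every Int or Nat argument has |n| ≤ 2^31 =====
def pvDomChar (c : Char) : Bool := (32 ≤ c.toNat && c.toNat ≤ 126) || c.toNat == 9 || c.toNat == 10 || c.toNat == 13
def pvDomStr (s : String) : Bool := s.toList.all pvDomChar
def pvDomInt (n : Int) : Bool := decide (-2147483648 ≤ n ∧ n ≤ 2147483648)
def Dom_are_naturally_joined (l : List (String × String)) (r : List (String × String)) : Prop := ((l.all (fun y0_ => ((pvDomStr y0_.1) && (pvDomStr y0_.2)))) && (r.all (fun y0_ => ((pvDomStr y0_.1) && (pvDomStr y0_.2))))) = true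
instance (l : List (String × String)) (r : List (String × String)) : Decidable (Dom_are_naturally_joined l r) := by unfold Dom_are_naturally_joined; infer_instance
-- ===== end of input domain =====

-- B replaces A's algorithm (build the key-set intersection, scan it comparing l[k] with r[k])
-- by a dict-merge identity: joinable iff {**l, **r} is strictly smaller than len(l)+len(r)
-- (some key collapsed, i.e. a common key exists) and {**l, **r} == {**r, **l} (the collapsed
-- keys carried equal values). Alternative decomposition, same asymptotic cost.

-- ===== PORT A =====
-- The dict arguments are modelled as association lists; each port first forms the Python dict
-- with PySem.Dict.ofList (last value per key wins, first position kept — exactly dict(pairs)).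
-- 'for key in inter_keys: if l[key] != r[key]: return False' then 'return True'.
-- l[key] / r[key] never raise here (key is in both key sets), so they are ported as get?;
-- comparing the two 'some' Options equals comparing the values. The loop's result is an
-- 'all' over the set, so it does not depend on Python's set iteration order.
def pvLoopA (ks : List String) (ld rd : PySem.Dict String String) : Bool :=
  match ks with
  | [] => true
  | k :: ks' => if ld.get? k != rd.get? k then false else pvLoopA ks' ld rd

def are_naturally_joined (l : List (String × String)) (r : List (String × String)) : Bool :=
  let ld := PySem.Dict.ofList l
  let rd := PySem.Dict.ofList r
  let interKeys : PySem.Set String :=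
    PySem.Set.inter (PySem.Set.ofList ld.keys) (PySem.Set.ofList rd.keys)
  if PySem.Set.len interKeys == 0 then false
  else pvLoopA interKeys ld rd

-- ===== PORT B =====
-- Python's '==' on dicts ignores insertion order: equal iff same size and every key-value
-- pair of the one is found in the other; ported by hand here (exact for dicts with
-- hashable/comparable keys and values, which String × String are).
def pvDictEq (d1 d2 : PySem.Dict String String) : Bool :=
  d1.size == d2.size && d1.items.all (fun p => d2.get? p.1 == some p.2)

-- 'merged = {**l, **r}' is dict(l) updated with r's items; 'len(merged) < len(l) + len(r)
--  and merged == {**r, **l}' is the returned conjunction.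
def are_naturally_joined_alt (l : List (String × String)) (r : List (String × String)) : Bool :=
  let ld := PySem.Dict.ofList l
  let rd := PySem.Dict.ofList r
  let merged := ld.update rd.items
  decide (merged.size < ld.size + rd.size) && pvDictEq merged (rd.update ld.items)

-- ===== PRECONDITION & SPEC =====
def Spec_are_naturally_joined (l : List (String × String)) (r : List (String × String)) (out : Bool) : Prop := out = are_naturally_joined_alt l r
instance (l : List (String × String)) (r : List (String × String)) (out : Bool) : Decidable (Spec_are_naturally_joined l r out) := by unfold Spec_are_naturally_joined; infer_instance

-- ===== CLAIM (what is proved, stated in full; the proofs are below) =====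
def Claim_equal_are_naturally_joined : Prop := ∀ (l : List (String × String)) (r : List (String × String)), Dom_are_naturally_joined l r → Spec_are_naturally_joined l r (are_naturally_joined l r)

-- ===== LEMMAS AND PROOFS =====

-- A's loop over the intersection is an 'all'.
theorem pvLoopA_eq_all (ks : List String) (ld rd : PySem.Dict String String) :
    pvLoopA ks ld rd = ks.all (fun k => ld.get? k == rd.get? k) := by
  induction ks with
  | nil => rfl
  | cons k ks' ih =>
    simp only [pvLoopA, List.all_cons, bne, ih]
    by_cases h : ld.get? k == rd.get? k <;> simp [h]

-- get? is the first item whose key matches.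
theorem pv_get?_eq_find? (d : PySem.Dict String String) (k : String) :
    d.get? k = (d.items.find? (fun p => p.1 == k)).map Prod.snd := by
  cases d with | mk its => ?_
  induction its with
  | nil => rfl
  | cons p rest ih =>
    rw [show (PySem.Dict.mk (p :: rest)).items = p :: rest from rfl,
        PySem.Dict.get?_mk_cons, List.find?_cons]
    by_cases h : p.1 == k
    · simp [h]
    · simp only [h] at *; simpa [h] using ih

-- Folding insert over pairs with distinct keys: lookup is the pair's value if present,
-- else the original dict's.
theorem pv_get?_foldl_insert (pairs : List (String × String)) (d : PySem.Dict String String)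
    (h : (pairs.map Prod.fst).Nodup) (k : String) :
    (pairs.foldl (fun d p => d.insert p.1 p.2) d).get? k =
      match pairs.find? (fun p => p.1 == k) with
      | some p => some p.2
      | none => d.get? k := by
  induction pairs generalizing d with
  | nil => rfl
  | cons p rest ih =>
    simp only [List.map_cons, List.nodup_cons] at h
    rw [List.foldl_cons, ih _ h.2, List.find?_cons]
    by_cases hk : p.1 == k
    · have hk' : p.1 = k := by simpa using hk
      have hfind : rest.find? (fun q => q.1 == k) = none := by
        rw [List.find?_eq_none]
        intro q hq hqk
        have hq1 : q.1 = k := by simpa using hqk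
        apply h.1
        rw [hk', ← hq1]
        exact List.mem_map_of_mem hq
      simp [hfind, hk', PySem.Dict.get?_insert_self]
    · have hk' : p.1 ≠ k := by simpa using hk
      simp only [hk]
      cases hfind : rest.find? (fun q => q.1 == k) with
      | some q => rfl
      | none => exact PySem.Dict.get?_insert_of_ne d p.2 (Ne.symm hk')

-- {**l, **r}: lookup prefers r.
theorem pv_get?_update (ld rd : PySem.Dict String String) (h : rd.keys.Nodup) (k : String) :
    (ld.update rd.items).get? k = if rd.contains k then rd.get? k else ld.get? k := by
  have hmap : rd.items.map Prod.fst = rd.keys := rfl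
  rw [show ld.update rd.items = rd.items.foldl (fun d p => d.insert p.1 p.2) ld from rfl,
      pv_get?_foldl_insert _ _ (hmap ▸ h), PySem.Dict.contains_eq_isSome_get?,
      pv_get?_eq_find? rd]
  cases rd.items.find? (fun p => p.1 == k) <;> simp

-- Keys of the merge: the ordered union.
theorem pv_keys_update (ld rd : PySem.Dict String String) :
    (ld.update rd.items).keys = PySem.Set.update ld.keys rd.keys := by
  have := PySem.Dict.keys_foldl_insert_key (l := rd.items) (key := Prod.fst)
    (f := fun _ p => p.2) (d := ld)
  simpa using this

-- Length of a set union (second argument duplicate-free).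
theorem pv_len_set_update (s : PySem.Set String) (xs : List String) (hxs : xs.Nodup) :
    (PySem.Set.update s xs).length = s.length + (xs.filter (fun x => !decide (x ∈ s))).length := by
  induction xs generalizing s with
  | nil => simp [PySem.Set.update]
  | cons x rest ih =>
    simp only [List.nodup_cons] at hxs
    rw [show PySem.Set.update s (x :: rest) = PySem.Set.update (PySem.Set.add s x) rest from rfl]
    by_cases hx : x ∈ s
    · rw [show PySem.Set.add s x = s from by simp [PySem.Set.add, hx]]
      simp [hx, ih s hxs.2]
    · rw [show PySem.Set.add s x = s ++ [x] from by simp [PySem.Set.add, hx]]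
      rw [ih _ hxs.2, List.filter_cons]
      have hcong : rest.filter (fun y => !decide (y ∈ s ++ [x]))
          = rest.filter (fun y => !decide (y ∈ s)) := by
        apply List.filter_congr
        intro y hy
        have hyx : y ≠ x := fun hxy => hxs.1 (hxy ▸ hy)
        simp [hyx]
      simp only [hcong, List.length_append, List.length_cons]
      simp [hx]
      omega

-- ===== VERDICT helper: the full equivalence on the two built dicts =====
theorem pv_main (ld rd : PySem.Dict String String) (hl : ld.keys.Nodup) (hr : rd.keys.Nodup) :
    (if PySem.Set.len (PySem.Set.inter (PySem.Set.ofList ld.keys) (PySem.Set.ofList rd.keys)) == 0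
     then false
     else pvLoopA (PySem.Set.inter (PySem.Set.ofList ld.keys) (PySem.Set.ofList rd.keys)) ld rd)
    = (decide ((ld.update rd.items).size < ld.size + rd.size)
        && pvDictEq (ld.update rd.items) (rd.update ld.items)) := by
  set inter := PySem.Set.inter (PySem.Set.ofList ld.keys) (PySem.Set.ofList rd.keys) with hinter
  have hmem : ∀ k, k ∈ inter ↔ k ∈ ld.keys ∧ k ∈ rd.keys := by
    intro k
    rw [hinter, PySem.Set.mem_inter]
    simp [PySem.Set.mem_ofList]
  -- sizes of the two merges
  have hsize : ∀ (a b : PySem.Dict String String), (a.update b.items).size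
      = (PySem.Set.update a.keys b.keys).length := by
    intro a b
    show (a.update b.items).items.length = _
    rw [← List.length_map (f := Prod.fst) (as := (a.update b.items).items)]
    rw [show (a.update b.items).items.map Prod.fst = (a.update b.items).keys from rfl,
        pv_keys_update]
  have hks : ∀ (d : PySem.Dict String String), d.size = d.keys.length := by
    intro d
    show d.items.length = _
    rw [show d.keys = d.items.map Prod.fst from rfl, List.length_map]
  -- first conjunct of B ↔ a common key exists
  have hlt : ((ld.update rd.items).size < ld.size + rd.size) ↔ ∃ k ∈ rd.keys, k ∈ ld.keys := by
    rw [hsize, hks, hks, pv_len_set_update _ _ hr]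
    have h1 : (rd.keys.filter (fun x => !decide (x ∈ ld.keys))).length < rd.keys.length
        ↔ ∃ x ∈ rd.keys, ¬ (!decide (x ∈ ld.keys)) = true :=
      List.length_filter_lt_length_iff_exists
    constructor
    · intro h
      obtain ⟨x, hx, hx2⟩ := h1.1 (by omega)
      exact ⟨x, hx, by simpa using hx2⟩
    · intro ⟨x, hx, hx2⟩
      have := h1.2 ⟨x, hx, by simpa using hx2⟩
      omega
  by_cases hE : ∃ k, k ∈ ld.keys ∧ k ∈ rd.keys
  · -- a common key exists: both drop to the value comparison
    obtain ⟨k0, hk0l, hk0r⟩ := hE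
    have hne : inter ≠ [] := List.ne_nil_of_mem ((hmem k0).2 ⟨hk0l, hk0r⟩)
    have hlen : (PySem.Set.len inter == 0) = false := by
      have hl' : inter.length ≠ 0 := by simpa [List.length_eq_zero_iff] using hne
      simp [PySem.Set.len, hl']
    have hlt' : decide ((ld.update rd.items).size < ld.size + rd.size) = true := by
      simp only [decide_eq_true_eq]
      exact hlt.2 ⟨k0, hk0r, hk0l⟩
    rw [hlen, hlt']
    simp only [Bool.false_eq_true, if_false, Bool.true_and]
    -- keys facts about the merges
    have hnlr : (ld.update rd.items).keys.Nodup := by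
      rw [pv_keys_update]; exact PySem.Set.nodup_update _ _ hl
    have hnrl : (rd.update ld.items).keys.Nodup := by
      rw [pv_keys_update]; exact PySem.Set.nodup_update _ _ hr
    have hmlr : ∀ k, k ∈ (ld.update rd.items).keys ↔ k ∈ ld.keys ∨ k ∈ rd.keys := by
      intro k; rw [pv_keys_update]; exact PySem.Set.mem_update ..
    have hmrl : ∀ k, k ∈ (rd.update ld.items).keys ↔ k ∈ ld.keys ∨ k ∈ rd.keys := by
      intro k; rw [pv_keys_update]
      rw [PySem.Set.mem_update]; exact or_comm
    -- the two merges always have the same size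
    have hsz : (ld.update rd.items).size = (rd.update ld.items).size := by
      rw [hsize, hsize, ← List.toFinset_card_of_nodup (PySem.Set.nodup_update _ _ hl),
          ← List.toFinset_card_of_nodup (PySem.Set.nodup_update _ _ hr)]
      congr 1
      apply Finset.ext
      intro a
      simp only [List.mem_toFinset, PySem.Set.mem_update]
      exact or_comm
    rw [pvLoopA_eq_all]
    -- both sides are 'all's: compare them as propositions
    rw [Bool.eq_iff_iff]
    simp only [pvDictEq, List.all_eq_true, Bool.and_eq_true, beq_iff_eq]
    constructor
    · rintro hall
      refine ⟨by rw [hsz], ?_⟩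
      rintro ⟨k, v⟩ hit
      dsimp only
      have hk : k ∈ (ld.update rd.items).keys := PySem.Dict.mem_keys_of_mem_items _ hit
      have hglr : (ld.update rd.items).get? k = some v := PySem.Dict.get?_of_mem_items _ hit hnlr
      rw [pv_get?_update _ _ hl]
      rw [pv_get?_update _ _ hr] at hglr
      by_cases hkl : k ∈ ld.keys <;> by_cases hkr : k ∈ rd.keys
      · -- common key: use the scanned equality
        have hvals := hall k ((hmem k).2 ⟨hkl, hkr⟩)
        rw [if_pos ((PySem.Dict.contains_iff_mem_keys ld k).2 hkl)]
        rw [if_pos ((PySem.Dict.contains_iff_mem_keys rd k).2 hkr)] at hglr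
        rw [hvals, hglr]
      · rw [if_pos ((PySem.Dict.contains_iff_mem_keys ld k).2 hkl)]
        rw [if_neg (fun hc => hkr ((PySem.Dict.contains_iff_mem_keys rd k).1 hc))] at hglr
        exact hglr
      · rw [if_neg (fun hc => hkl ((PySem.Dict.contains_iff_mem_keys ld k).1 hc))]
        rw [if_pos ((PySem.Dict.contains_iff_mem_keys rd k).2 hkr)] at hglr
        exact hglr
      · exact absurd ((hmlr k).1 hk) (by simp [hkl, hkr])
    · rintro ⟨-, hall⟩ k hk
      obtain ⟨hkl, hkr⟩ := (hmem k).1 hk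
      -- k is a key of the l-first merge: fetch its item
      have hkm : k ∈ (ld.update rd.items).keys := (hmlr k).2 (Or.inl hkl)
      have hex : ∃ v, (k, v) ∈ (ld.update rd.items).items := by
        rcases List.mem_map.1 (show k ∈ (ld.update rd.items).items.map Prod.fst from hkm)
          with ⟨⟨a, b⟩, hp, rfl⟩
        exact ⟨b, hp⟩
      obtain ⟨v, hv⟩ := hex
      have h1 : (ld.update rd.items).get? k = some v := PySem.Dict.get?_of_mem_items _ hv hnlr
      have h2 : (rd.update ld.items).get? k = some v := hall (k, v) hv
      rw [pv_get?_update _ _ hr, if_pos ((PySem.Dict.contains_iff_mem_keys rd k).2 hkr)] at h1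
      rw [pv_get?_update _ _ hl, if_pos ((PySem.Dict.contains_iff_mem_keys ld k).2 hkl)] at h2
      rw [h1, h2]
  · -- no common key: A's intersection is empty, B's merge does not shrink
    push Not at hE
    have hie : inter = [] := by
      apply List.eq_nil_iff_forall_not_mem.2
      intro k hk
      obtain ⟨hkl, hkr⟩ := (hmem k).1 hk
      exact hE k hkl hkr
    have hlt' : decide ((ld.update rd.items).size < ld.size + rd.size) = false := by
      simp only [decide_eq_false_iff_not]
      intro h
      obtain ⟨k, hkr, hkl⟩ := hlt.1 h
      exact hE k hkl hkr
    rw [hie, hlt']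
    simp [PySem.Set.len]

-- ===== VERDICT (by name: the statement is the Claim_ definition above) =====
theorem are_naturally_joined_spec : Claim_equal_are_naturally_joined := by
  intro l r _
  unfold Spec_are_naturally_joined are_naturally_joined are_naturally_joined_alt
  exact pv_main (PySem.Dict.ofList l) (PySem.Dict.ofList r)
    (PySem.Dict.nodup_keys_ofList l) (PySem.Dict.nodup_keys_ofList r)
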